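-- pv_equiv track=rewrite | github.com/opendesigndev/open-design-engine | generate-api-bindings.py | makeMethodFunctionName
-- ===== SOURCE A (Python) =====
-- def makeMethodFunctionName(emName, methodName):
--     functionName = 'ode_'
--     prevChar = '_'
--     for c in emName:
--         if prevChar == '_':
--             functionName += c.lower()
--         else:
--             functionName += c
--         prevChar = c
--     return functionName+'_'+methodName
-- ===== SOURCE B (Python) =====
-- def makeMethodFunctionName(emName, methodName):
--     return ('ode_'
--             + '_'.join(seg[:1].lower() + seg[1:] for seg in emName.split('_'))
--             + '_' + methodName)
-- ===== Notes on version B (the rewrite author's own statement) =====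
-- stated objective: idiomatic
-- what changed: Replaced the stateful prevChar character-by-character scan with a split('_')/lowercase-first-char/'_'.join pipeline over whole segments.
import Mathlib
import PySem

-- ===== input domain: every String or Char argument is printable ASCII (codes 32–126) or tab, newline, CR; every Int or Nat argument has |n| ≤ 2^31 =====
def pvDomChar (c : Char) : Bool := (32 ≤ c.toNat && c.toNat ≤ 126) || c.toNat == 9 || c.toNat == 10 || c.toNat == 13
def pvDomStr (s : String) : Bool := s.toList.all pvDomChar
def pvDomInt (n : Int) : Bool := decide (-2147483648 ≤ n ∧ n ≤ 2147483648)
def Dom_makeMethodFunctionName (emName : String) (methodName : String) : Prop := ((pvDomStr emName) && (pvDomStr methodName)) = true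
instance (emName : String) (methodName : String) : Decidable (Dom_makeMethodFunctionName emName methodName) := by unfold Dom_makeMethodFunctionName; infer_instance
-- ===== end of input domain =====

-- B replaces A's stateful prevChar character scan with a split-on-'_'/lowercase-first/join pipeline (idiomatic; same O(n) cost).


-- ===== PORT A =====
-- the loop body: state = (functionName so far, prevChar)
def pvAStep (st : List Char × Char) (c : Char) : List Char × Char :=
  (if st.2 == '_' then st.1 ++ [PySem.Chars.lowerChar c] else st.1 ++ [c], c)

def makeMethodFunctionName (emName : String) (methodName : String) : String :=
  String.mk ((emName.toList.foldl pvAStep ("ode_".toList, '_')).1 ++ ['_'] ++ methodName.toList)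

-- ===== PORT B =====
-- seg[:1].lower() + seg[1:]
def pvBSeg (seg : List Char) : List Char :=
  PySem.Chars.lower (PySem.List.slice seg none (some 1)) ++ PySem.List.slice seg (some 1) none

def makeMethodFunctionName_alt (emName : String) (methodName : String) : String :=
  String.mk ("ode_".toList
    ++ PySem.Chars.join ['_'] ((emName.toList.splitOn '_').map pvBSeg)
    ++ ['_'] ++ methodName.toList)

-- ===== PRECONDITION & SPEC =====
def Spec_makeMethodFunctionName (emName : String) (methodName : String) (out : String) : Prop := out = makeMethodFunctionName_alt emName methodName
instance (emName : String) (methodName : String) (out : String) : Decidable (Spec_makeMethodFunctionName emName methodName out) := by unfold Spec_makeMethodFunctionName; infer_instance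

-- ===== CLAIM (what is proved, stated in full; the proofs are below) =====
def Claim_equal_makeMethodFunctionName : Prop := ∀ (emName : String) (methodName : String), Dom_makeMethodFunctionName emName methodName → Spec_makeMethodFunctionName emName methodName (makeMethodFunctionName emName methodName)

-- ===== LEMMAS AND PROOFS =====

-- the segments of B's pipeline when the loop starts with a non-'_' previous char: first segment kept verbatim
def pvFirstKeep : List (List Char) → List (List Char)
  | [] => []
  | s :: ss => s :: ss.map pvBSeg

theorem pvBSeg_nil : pvBSeg [] = [] := by decide

theorem pvBSeg_cons (c : Char) (t : List Char) :
    pvBSeg (c :: t) = PySem.Chars.lowerChar c :: t := by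
  simp [pvBSeg, PySem.List.slice, PySem.Chars.lower]

theorem pvJoin_cons_head (sep : List Char) (a : Char) (s : List Char) (ss : List (List Char)) :
    PySem.Chars.join sep ((a :: s) :: ss) = a :: PySem.Chars.join sep (s :: ss) := by
  cases ss with
  | nil => simp [PySem.Chars.join, List.intercalate]
  | cons t ts =>
      rw [PySem.Chars.join_cons_cons, PySem.Chars.join_cons_cons]
      simp

theorem pvMain (cs : List Char) : ∀ (acc : List Char) (prev : Char),
    (List.foldl pvAStep (acc, prev) cs).1 =
      acc ++ PySem.Chars.join ['_']
        (if prev == '_' then (cs.splitOn '_').map pvBSeg else pvFirstKeep (cs.splitOn '_')) := by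
  induction cs with
  | nil =>
      intro acc prev
      by_cases h : prev = '_' <;>
        simp [h, List.splitOn, List.splitOnP_nil, pvBSeg_nil, pvFirstKeep,
              PySem.Chars.join, List.intercalate]
  | cons c rest ih =>
      intro acc prev
      have hS := List.splitOnP_ne_nil (fun x => x == '_') rest
      obtain ⟨s0, ss, hs⟩ := List.exists_cons_of_ne_nil hS
      by_cases hc : c = '_'
      · subst hc
        have hlow : PySem.Chars.lowerChar '_' = '_' := by decide
        have hloop :
            (List.foldl pvAStep (acc, prev) ('_' :: rest)).1 =
              (List.foldl pvAStep (acc ++ ['_'], '_') rest).1 := by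
          by_cases h : prev = '_' <;> simp [pvAStep, h, hlow]
        rw [hloop, ih]
        simp only [List.splitOn] at *
        by_cases h : prev = '_' <;>
          simp [h, hs, pvFirstKeep, pvBSeg_nil] <;>
          rw [PySem.Chars.join_cons_cons] <;> simp
      · have hsplit : ((c :: rest).splitOn '_') = (c :: s0) :: ss := by
          simp only [List.splitOn] at hs ⊢
          rw [List.splitOnP_cons]
          simp [hc, hs]
        have hloop :
            (List.foldl pvAStep (acc, prev) (c :: rest)).1 =
              (List.foldl pvAStep
                (acc ++ [if prev == '_' then PySem.Chars.lowerChar c else c], c) rest).1 := by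
          by_cases h : prev = '_' <;> simp [pvAStep, h]
        rw [hloop, ih]
        simp only [List.splitOn] at hsplit ⊢
        rw [hsplit, hs]
        by_cases h : prev = '_' <;>
          simp [h, hc, pvFirstKeep, pvBSeg_cons, pvJoin_cons_head]
  
-- ===== VERDICT (by name: the statement is the Claim_ definition above) =====
theorem makeMethodFunctionName_spec : Claim_equal_makeMethodFunctionName := by
  intro emName methodName _
  unfold Spec_makeMethodFunctionName makeMethodFunctionName makeMethodFunctionName_alt
  rw [pvMain]
  simp
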